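-- pv_equiv track=rewrite | github.com/TingyanXiang/NLU_OIE_UnifiedModels | train_withProcessingCode.py | pm_last3
-- ===== SOURCE A (Python) =====
-- def pm_last3(tgt_fact_num):
--     pm_list = []
--     for i in tgt_fact_num:
--         order = list(range(i))
--         if i>3:
--             pm_list.append(order[-3:]+order[:-3])
--         elif i==3:
--             pm_list.append(order[-2:]+order[:-2])
--         elif i==2:
--             pm_list.append(order[::-1])
--         else:
--             pm_list.append(order)
--     return pm_list
-- ===== SOURCE B (Python) =====
-- def pm_last3(tgt_fact_num):
--     pm_list = []
--     for i in tgt_fact_num: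
--         k = min(max(i - 1, 0), 3)
--         pm_list.append([(j - k) % i for j in range(i)])
--     return pm_list
-- ===== Notes on version B (the rewrite author's own statement) =====
-- stated objective: simpler
-- what changed: Replaces the four-way if/elif branch with slice concatenations by one arithmetic shift amount k = min(max(i-1,0),3) and a single modular index map [(j-k)%i for j in range(i)].
import Mathlib
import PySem

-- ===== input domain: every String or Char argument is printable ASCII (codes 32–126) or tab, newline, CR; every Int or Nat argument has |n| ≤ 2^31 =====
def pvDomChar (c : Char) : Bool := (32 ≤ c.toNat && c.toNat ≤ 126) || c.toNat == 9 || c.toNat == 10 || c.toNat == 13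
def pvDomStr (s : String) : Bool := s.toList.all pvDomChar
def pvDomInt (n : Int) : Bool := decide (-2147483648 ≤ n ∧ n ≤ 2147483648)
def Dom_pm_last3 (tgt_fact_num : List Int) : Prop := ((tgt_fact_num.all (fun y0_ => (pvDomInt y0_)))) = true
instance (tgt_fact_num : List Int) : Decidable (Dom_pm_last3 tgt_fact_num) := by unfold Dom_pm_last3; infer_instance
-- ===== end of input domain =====

-- B computes each rotated permutation by a single modular index map instead of A's
-- four-way branch over slice concatenations; same cost, simpler decomposition.

-- ===== PORT A =====
def pm_last3 (tgt_fact_num : List Int) : List (List Int) :=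
  tgt_fact_num.foldl (fun pm_list i =>
    let order := PySem.List.pyRange 0 i 1
    if i > 3 then
      pm_list ++ [PySem.List.slice order (some (-3)) none ++ PySem.List.slice order none (some (-3))]
    else if i = 3 then
      pm_list ++ [PySem.List.slice order (some (-2)) none ++ PySem.List.slice order none (some (-2))]
    else if i = 2 then
      pm_list ++ [(PySem.List.slice? order none none (-1)).getD []]   -- order[::-1]; step ≠ 0 so never none
    else
      pm_list ++ [order]) []

-- ===== PORT B =====
def pm_last3_alt (tgt_fact_num : List Int) : List (List Int) :=
  tgt_fact_num.foldl (fun pm_list i =>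
    let k := min (max (i - 1) 0) 3
    pm_list ++ [(PySem.List.pyRange 0 i 1).map (fun j => PySem.Int.mod (j - k) i)]) []

-- ===== PRECONDITION & SPEC =====
def Spec_pm_last3 (tgt_fact_num : List Int) (out : List (List Int)) : Prop := out = pm_last3_alt tgt_fact_num
instance (tgt_fact_num : List Int) (out : List (List Int)) : Decidable (Spec_pm_last3 tgt_fact_num out) := by unfold Spec_pm_last3; infer_instance

-- ===== CLAIM (what is proved, stated in full; the proofs are below) =====
def Claim_equal_pm_last3 : Prop := ∀ (tgt_fact_num : List Int), Dom_pm_last3 tgt_fact_num → Spec_pm_last3 tgt_fact_num (pm_last3 tgt_fact_num)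

-- ===== LEMMAS AND PROOFS =====

theorem mod_small_nonneg (a i : Int) (h0 : 0 ≤ a) (h1 : a < i) : PySem.Int.mod a i = a := by
  rw [PySem.Int.mod_eq_emod_of_pos (by omega)]
  exact Int.emod_eq_of_lt h0 h1

theorem mod_small_neg (a i : Int) (h0 : -i ≤ a) (h1 : a < 0) : PySem.Int.mod a i = a + i := by
  rw [PySem.Int.mod_eq_emod_of_pos (by omega)]
  have h2 : (a + i) % i = a % i := by
    have h := Int.add_mul_emod_self_left (a := a) (b := i) (c := 1)
    rw [mul_one] at h
    exact h
  have h3 : (a + i) % i = a + i := Int.emod_eq_of_lt (by omega) (by omega)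
  rw [← h2, h3]

-- per-element agreement of the two loop bodies
theorem pm_body_eq (acc : List (List Int)) (i : Int) :
    (let order := PySem.List.pyRange 0 i 1
     if i > 3 then
       acc ++ [PySem.List.slice order (some (-3)) none ++ PySem.List.slice order none (some (-3))]
     else if i = 3 then
       acc ++ [PySem.List.slice order (some (-2)) none ++ PySem.List.slice order none (some (-2))]
     else if i = 2 then
       acc ++ [(PySem.List.slice? order none none (-1)).getD []]
     else acc ++ [order])
    = acc ++ [(PySem.List.pyRange 0 i 1).map (fun j => PySem.Int.mod (j - min (max (i - 1) 0) 3) i)] := by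
  by_cases h4 : i > 3
  · have hk : min (max (i - 1) 0) 3 = 3 := by omega
    simp only [if_pos h4, hk]
    congr 1
    rw [PySem.List.slice_from_neg_ofNat _ 3 (by norm_num),
        PySem.List.slice_to_neg_ofNat _ 3 (by norm_num)]
    have hsA : PySem.List.pyRange 0 i 1
        = PySem.List.pyRange 0 (i - 3) 1 ++ PySem.List.pyRange (i - 3) i 1 :=
      PySem.List.pyRange_one_append 0 (i - 3) i (by omega) (by omega)
    have hsB : PySem.List.pyRange 0 i 1
        = PySem.List.pyRange 0 3 1 ++ PySem.List.pyRange 3 i 1 :=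
      PySem.List.pyRange_one_append 0 3 i (by omega) (by omega)
    have hlen : (PySem.List.pyRange 0 i 1).length - 3 = (PySem.List.pyRange 0 (i - 3) 1).length := by
      rw [PySem.List.length_pyRange_one, PySem.List.length_pyRange_one]; omega
    rw [hlen]
    conv_lhs => rw [hsA, List.drop_left, List.take_left]
    conv_rhs => rw [hsB, List.map_append]
    have h1 : (PySem.List.pyRange 0 3 1).map (fun j => PySem.Int.mod (j - 3) i)
        = PySem.List.pyRange (i - 3) i 1 := by
      have e0 : PySem.List.pyRange 0 3 1 = [0, 1, 2] := by decide
      rw [e0, PySem.List.pyRange_one (i - 3) i]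
      have e1 : (i - (i - 3)).toNat = 3 := by omega
      rw [e1]
      simp only [List.map, List.range_succ, List.range_zero, List.nil_append,
        List.cons_append, Nat.cast_ofNat, Nat.cast_one, Nat.cast_zero]
      rw [mod_small_neg _ i (by omega) (by omega),
          mod_small_neg _ i (by omega) (by omega),
          mod_small_neg _ i (by omega) (by omega)]
      norm_num
      constructor
      · omega
      constructor
      · omega
      · omega
    have h2 : (PySem.List.pyRange 3 i 1).map (fun j => PySem.Int.mod (j - 3) i)
        = PySem.List.pyRange 0 (i - 3) 1 := by
      rw [PySem.List.pyRange_one 3 i, PySem.List.pyRange_one 0 (i - 3), List.map_map]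
      have e1 : (i - 3 - 0).toNat = (i - 3).toNat := by omega
      rw [e1]
      apply List.map_congr_left
      intro k hk2
      have hk3 : (k : Int) < i - 3 := by
        have := List.mem_range.mp hk2
        omega
      simp only [Function.comp]
      rw [show (3 : Int) + k - 3 = (k : Int) by ring,
          mod_small_nonneg _ i (by positivity) (by omega)]
      omega
    rw [h1, h2]
  · by_cases h3 : i = 3
    · subst h3; norm_num; decide
    · by_cases h2 : i = 2
      · subst h2; norm_num; decide
      · have hk : min (max (i - 1) 0) 3 = 0 := by omega
        simp only [if_neg h4, if_neg h3, if_neg h2, hk]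
        congr 1
        have hmap : (PySem.List.pyRange 0 i 1).map
            (fun j => PySem.Int.mod (j - 0) i) = PySem.List.pyRange 0 i 1 := by
          have := List.map_congr_left (l := PySem.List.pyRange 0 i 1)
            (f := fun j => PySem.Int.mod (j - 0) i) (g := fun j => j) ?_
          · simpa using this
          · intro j hj
            have hj2 := (PySem.List.mem_pyRange_one).mp hj
            simp only []
            rw [sub_zero, mod_small_nonneg _ i hj2.1 hj2.2]
        rw [hmap]


-- ===== VERDICT (by name: the statement is the Claim_ definition above) =====
theorem pm_last3_spec : Claim_equal_pm_last3 := by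
  intro l _
  unfold Spec_pm_last3 pm_last3 pm_last3_alt
  apply PySem.List.foldl_congr_mem
  intro acc x _
  exact pm_body_eq acc x
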